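-- pv_equiv track=rewrite | github.com/yuping3252/CodeDataSearchEngine | tables/merge_lst.py | flatten_lst
-- ===== SOURCE A (Python) =====
-- def flatten_lst(c_lst, c_nbr):
--     c = 0
--     c_headers = []
--     b = 0
--     j = 0
--     for cols in c_lst:
--         for col in cols:
--             if c == c_nbr:
--                 j = 1
--                 break
--             c_headers.append(col)
--             c += 1
--         if j == 1:
--             break
--         b += 1
--     return c_headers, b
-- ===== SOURCE B (Python) =====
-- def flatten_lst(c_lst, c_nbr):
--     c_headers = []
--     b = 0
--     for cols in c_lst:
--         if len(c_headers) <= c_nbr < len(c_headers) + len(cols):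
--             c_headers.extend(cols[:c_nbr - len(c_headers)])
--             break
--         c_headers.extend(cols)
--         b += 1
--     return c_headers, b
-- ===== Notes on version B (the rewrite author's own statement) =====
-- stated objective: simpler
-- what changed: B replaces A's element-level inner loop with its counter c and break flag j by a single loop over the sublists that extends the result a whole (or sliced) sublist at a time, breaking when the cutoff index falls inside the current sublist.
import Mathlib
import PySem

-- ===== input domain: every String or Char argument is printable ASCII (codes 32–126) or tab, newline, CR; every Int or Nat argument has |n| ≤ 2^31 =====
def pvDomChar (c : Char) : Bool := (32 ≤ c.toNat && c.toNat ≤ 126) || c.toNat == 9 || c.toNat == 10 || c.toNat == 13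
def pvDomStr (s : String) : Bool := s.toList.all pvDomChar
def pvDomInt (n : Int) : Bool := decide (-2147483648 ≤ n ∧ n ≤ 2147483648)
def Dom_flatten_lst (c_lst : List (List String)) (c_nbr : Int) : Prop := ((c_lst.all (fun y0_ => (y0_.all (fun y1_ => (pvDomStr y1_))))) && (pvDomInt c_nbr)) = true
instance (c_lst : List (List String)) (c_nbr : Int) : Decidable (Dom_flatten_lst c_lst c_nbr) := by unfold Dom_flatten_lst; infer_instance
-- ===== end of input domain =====

-- B drops A's element-level counter loop and break flag: one loop over the sublists,
-- appending a whole (or sliced) sublist at a time (objective: simpler decomposition).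

-- ===== PORT A =====
-- inner 'for col in cols' loop: returns (c_headers, c, j)
def flattenInnerA (cols : List String) (c_nbr : Int) (c : Int) (hdr : List String) :
    List String × Int × Int :=
  match cols with
  | [] => (hdr, c, 0)
  | col :: rest =>
    if c = c_nbr then (hdr, c, 1)
    else flattenInnerA rest c_nbr (c + 1) (hdr ++ [col])

-- outer 'for cols in c_lst' loop with the 'if j == 1: break'
def flattenOuterA (lst : List (List String)) (c_nbr : Int) (c : Int) (hdr : List String)
    (b : Int) : List String × Int :=
  match lst with
  | [] => (hdr, b)
  | cols :: rest =>
    let r := flattenInnerA cols c_nbr c hdr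
    if r.2.2 = 1 then (r.1, b)
    else flattenOuterA rest c_nbr r.2.1 r.1 (b + 1)

def flatten_lst (c_lst : List (List String)) (c_nbr : Int) : List String × Int :=
  flattenOuterA c_lst c_nbr 0 [] 0

-- ===== PORT B =====
-- 'for cols: if len(hdr) <= c_nbr < len(hdr) + len(cols): extend(cols[:c_nbr-len(hdr)]); break
--            else: extend(cols); b += 1'
def flattenLoopB (lst : List (List String)) (c_nbr : Int) (hdr : List String) (b : Int) :
    List String × Int :=
  match lst with
  | [] => (hdr, b)
  | cols :: rest =>
    if (hdr.length : Int) ≤ c_nbr ∧ c_nbr < (hdr.length : Int) + (cols.length : Int) then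
      (hdr ++ PySem.List.slice cols none (some (c_nbr - (hdr.length : Int))), b)
    else flattenLoopB rest c_nbr (hdr ++ cols) (b + 1)

def flatten_lst_alt (c_lst : List (List String)) (c_nbr : Int) : List String × Int :=
  flattenLoopB c_lst c_nbr [] 0

-- ===== PRECONDITION & SPEC =====
def Spec_flatten_lst (c_lst : List (List String)) (c_nbr : Int) (out : List String × Int) : Prop := out = flatten_lst_alt c_lst c_nbr
instance (c_lst : List (List String)) (c_nbr : Int) (out : List String × Int) : Decidable (Spec_flatten_lst c_lst c_nbr out) := by unfold Spec_flatten_lst; infer_instance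

-- ===== CLAIM (what is proved, stated in full; the proofs are below) =====
def Claim_equal_flatten_lst : Prop := ∀ (c_lst : List (List String)) (c_nbr : Int), Dom_flatten_lst c_lst c_nbr → Spec_flatten_lst c_lst c_nbr (flatten_lst c_lst c_nbr)

-- ===== LEMMAS AND PROOFS =====

-- inner loop, no break case: the counter never meets c_nbr (all of cols appended)
theorem flattenInnerA_no_break (cols : List String) (c_nbr c : Int) (hdr : List String)
    (hc0 : 0 ≤ c) (h : c_nbr < 0 ∨ c + (cols.length : Int) ≤ c_nbr) :
    flattenInnerA cols c_nbr c hdr = (hdr ++ cols, c + (cols.length : Int), 0) := by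
  induction cols generalizing c hdr with
  | nil => simp [flattenInnerA]
  | cons x xs ih =>
    simp only [List.length_cons] at h
    have hne : ¬ c = c_nbr := by omega
    simp only [flattenInnerA, if_neg hne]
    rw [ih (c + 1) (hdr ++ [x]) (by omega) (by push_cast at h ⊢; omega)]
    simp; omega

-- inner loop, break case: break at c = c_nbr mid-sublist
theorem flattenInnerA_break (cols : List String) (c_nbr c : Int) (hdr : List String)
    (hc : c ≤ c_nbr) (h : c_nbr < c + (cols.length : Int)) :
    flattenInnerA cols c_nbr c hdr =
      (hdr ++ cols.take (c_nbr - c).toNat, c_nbr, 1) := by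
  induction cols generalizing c hdr with
  | nil => simp at h; omega
  | cons x xs ih =>
    by_cases hce : c = c_nbr
    · subst hce
      simp [flattenInnerA]
    · have hc' : c + 1 ≤ c_nbr := by omega
      simp only [flattenInnerA, if_neg hce]
      rw [ih (c + 1) (hdr ++ [x]) hc' (by simp only [List.length_cons] at h; push_cast at h ⊢; omega)]
      have htn : (c_nbr - c).toNat = (c_nbr - (c + 1)).toNat + 1 := by omega
      simp [htn, List.take_succ_cons]

-- A's outer loop equals B's loop under the invariant c = len(hdr) and (c_nbr < 0 ∨ c ≤ c_nbr)
theorem outer_eq (lst : List (List String)) (c_nbr : Int) (hdr : List String) (b : Int)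
    (hinv : c_nbr < 0 ∨ (hdr.length : Int) ≤ c_nbr) :
    flattenOuterA lst c_nbr (hdr.length : Int) hdr b = flattenLoopB lst c_nbr hdr b := by
  induction lst generalizing hdr b with
  | nil => simp [flattenOuterA, flattenLoopB]
  | cons cols rest ih =>
    by_cases hbrk : (hdr.length : Int) ≤ c_nbr ∧ c_nbr < (hdr.length : Int) + (cols.length : Int)
    · -- break: the cutoff lies inside this sublist, inner loop sets j = 1
      rw [flattenOuterA, flattenInnerA_break cols c_nbr _ hdr hbrk.1 hbrk.2]
      rw [flattenLoopB, if_pos hbrk, PySem.List.slice_to _ (by omega)]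
      simp
    · -- no break: the whole sublist is appended, b incremented
      have hnb : c_nbr < 0 ∨ (hdr.length : Int) + (cols.length : Int) ≤ c_nbr := by
        rcases hinv with h | h
        · exact Or.inl h
        · right; by_contra hlt; exact hbrk ⟨h, by omega⟩
      rw [flattenOuterA, flattenInnerA_no_break cols c_nbr _ hdr (by positivity) hnb]
      simp only [Int.reduceEq, reduceIte]
      have hlen : (hdr.length : Int) + (cols.length : Int) = ((hdr ++ cols).length : Int) := by
        simp
      rw [hlen, flattenLoopB, if_neg hbrk]
      exact ih (hdr ++ cols) (b + 1) (by rw [← hlen]; exact hnb)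

-- ===== VERDICT (by name: the statement is the Claim_ definition above) =====
theorem flatten_lst_spec : Claim_equal_flatten_lst := by
  intro c_lst c_nbr _
  unfold Spec_flatten_lst flatten_lst flatten_lst_alt
  have h := outer_eq c_lst c_nbr [] 0 (by simp; omega)
  simpa using h
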